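-- pv_equiv track=rewrite | github.com/joha4022/2270_final | rsa.py | Convert_Text
-- ===== SOURCE A (Python) =====
-- def Convert_Text(_string):
--     # integer_list = []
--     # for ltr in _string:
--     #     integer_list.append(ord(ltr))
--     # return integer_list
--     integer_list = []
--     first_d = ''
--     i = 0
--     while i < len(_string):
--         if(len(str(ord(_string[i]))) == 2):
--             first_d += '0' + str(ord(_string[i]))
--         else:
--             first_d += str(ord(_string[i]))
--         i += 1
--         if(i < len(_string)):
--             if(len(str(ord(_string[i]))) == 2):
--                 first_d += '0' + str(ord(_string[i]))
--             else:
--                 first_d += str(ord(_string[i]))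
--             i += 1
--         integer_list.append(first_d)
--         first_d = ''
--     return integer_list
-- ===== SOURCE B (Python) =====
-- def Convert_Text(_string):
--     codes = []
--     for c in _string:
--         code = str(ord(c))
--         codes.append('0' + code if len(code) == 2 else code)
--     return [''.join(codes[i:i + 2]) for i in range(0, len(codes), 2)]
-- ===== Notes on version B (the rewrite author's own statement) =====
-- stated objective: simpler
-- what changed: A's single interleaved while-loop that manually advances the index twice and pads inline is replaced by a two-phase decomposition: one pass mapping each char to its padded code, then grouping the codes in pairs with slicing over range(0, len, 2).
import Mathlib
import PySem

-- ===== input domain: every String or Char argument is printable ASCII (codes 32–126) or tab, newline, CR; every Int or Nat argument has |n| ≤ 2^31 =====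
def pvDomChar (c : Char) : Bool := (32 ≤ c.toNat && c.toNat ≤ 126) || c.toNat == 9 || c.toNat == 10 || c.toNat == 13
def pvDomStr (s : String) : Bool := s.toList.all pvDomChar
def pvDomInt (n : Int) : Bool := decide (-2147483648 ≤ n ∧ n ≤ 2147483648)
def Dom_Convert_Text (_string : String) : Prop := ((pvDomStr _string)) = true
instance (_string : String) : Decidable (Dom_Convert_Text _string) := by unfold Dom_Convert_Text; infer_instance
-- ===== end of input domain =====

-- B replaces A's interleaved two-step while-loop by a map pass (char → padded code)
-- followed by a pair-grouping pass over range(0, len, 2) with slicing; same O(n) cost, simpler decomposition.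

-- ===== PORT A =====
-- A's while-loop consumes one or two characters per iteration, building first_d inline
-- with the duplicated pad-if-two-digits branch, and appends first_d to integer_list (acc).
def pvALoop : List Char → List String → List String
  | [], acc => acc
  | c1 :: rest, acc =>
    let s1 := PySem.Int.toStr (c1.toNat : Int)
    let f1 := if PySem.Str.len s1 == 2 then "0" ++ s1 else s1
    match rest with
    | [] => acc ++ [f1]
    | c2 :: rest2 =>
      let s2 := PySem.Int.toStr (c2.toNat : Int)
      let f2 := if PySem.Str.len s2 == 2 then f1 ++ ("0" ++ s2) else f1 ++ s2
      pvALoop rest2 (acc ++ [f2])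

def Convert_Text (_string : String) : List String :=
  pvALoop _string.toList []

-- ===== PORT B =====
-- Source B: code = str(ord(c)); codes.append('0'+code if len(code)==2 else code)
def pvEnc (c : Char) : String :=
  let code := PySem.Int.toStr (c.toNat : Int)
  if PySem.Str.len code == 2 then "0" ++ code else code

-- Source B: [''.join(codes[i:i+2]) for i in range(0, len(codes), 2)]
def Convert_Text_alt (_string : String) : List String :=
  let codes := _string.toList.map pvEnc
  (PySem.List.pyRange 0 codes.length 2).foldl
    (fun acc i => acc ++ [PySem.Str.join "" (PySem.List.slice codes (some i) (some (i + 2)))]) []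

-- ===== PRECONDITION & SPEC =====
def Spec_Convert_Text (_string : String) (out : List String) : Prop := out = Convert_Text_alt _string
instance (_string : String) (out : List String) : Decidable (Spec_Convert_Text _string out) := by unfold Spec_Convert_Text; infer_instance

-- ===== CLAIM (what is proved, stated in full; the proofs are below) =====
def Claim_equal_Convert_Text : Prop := ∀ (_string : String), Dom_Convert_Text _string → Spec_Convert_Text _string (Convert_Text _string)

-- ===== LEMMAS AND PROOFS =====

-- common normal form: join the encoded codes in pairs
def pvJoinChunk : List String → List String
  | [] => []
  | [x] => [x]
  | x :: y :: rest => (x ++ y) :: pvJoinChunk rest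

-- A-side: the loop is the pair recursion with an accumulator
def pvChunk : List Char → List String
  | [] => []
  | [c] => [pvEnc c]
  | c1 :: c2 :: rest => (pvEnc c1 ++ pvEnc c2) :: pvChunk rest

theorem pvALoop_eq (l : List Char) (acc : List String) :
    pvALoop l acc = acc ++ pvChunk l := by
  induction l using pvChunk.induct generalizing acc with
  | case1 => simp [pvALoop, pvChunk]
  | case2 c => simp [pvALoop, pvChunk, pvEnc]
  | case3 c1 c2 rest ih =>
    simp only [pvALoop, pvChunk, ih, List.append_assoc, List.singleton_append, pvEnc]
    split_ifs <;> simp [String.append_assoc]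

theorem pvChunk_eq_joinChunk (l : List Char) : pvChunk l = pvJoinChunk (l.map pvEnc) := by
  induction l using pvChunk.induct <;> simp [pvChunk, pvJoinChunk, *]

-- B-side: ''.join of lists of one / two strings
theorem pvJoin_single (a : String) : PySem.Str.join "" [a] = a := by
  rw [← String.toList_inj]
  simp [PySem.Str.toList_join, PySem.Chars.join_singleton]

theorem pvJoin_pair (a b : String) : PySem.Str.join "" [a, b] = a ++ b := by
  rw [← String.toList_inj]
  simp [PySem.Str.toList_join, PySem.Chars.join_cons_cons, PySem.Chars.join_singleton]

-- B-side: the range(0, n, 2) comprehension is the pair recursion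
theorem pvRangeMap_eq (codes : List String) :
    (List.range (((codes.length : Int) + 1) / 2).toNat).map
        (fun k => PySem.Str.join "" ((codes.drop (2 * k)).take 2)) = pvJoinChunk codes := by
  induction codes using pvJoinChunk.induct with
  | case1 => simp [pvJoinChunk]
  | case2 x =>
    simp [List.range_succ, pvJoinChunk, pvJoin_single]
  | case3 x y rest ih =>
    have h1 : (((x :: y :: rest).length : Int) + 1) / 2 = ((rest.length : Int) + 1) / 2 + 1 := by
      simp only [List.length_cons]; omega
    have h2 : ((((rest.length : Int) + 1) / 2) + 1).toNat = (((rest.length : Int) + 1) / 2).toNat + 1 := by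
      omega
    rw [h1, h2, List.range_succ_eq_map]
    simp only [List.map_cons, List.map_map]
    refine congrArg₂ _ ?_ ?_
    · simp [pvJoin_pair]
    · rw [← ih]
      refine List.map_congr_left fun k _ => ?_
      have : 2 * Nat.succ k = (2 * k) + 2 := by omega
      simp [Function.comp, this, List.drop_succ_cons]

theorem pvFoldl_eq (codes : List String) :
    (PySem.List.pyRange 0 codes.length 2).foldl
        (fun acc i => acc ++ [PySem.Str.join "" (PySem.List.slice codes (some i) (some (i + 2)))]) [] =
      pvJoinChunk codes := by
  rw [PySem.List.foldl_append_singleton_eq_map, PySem.List.pyRange_of_pos _ _ (by norm_num : (0:Int) < 2),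
    List.map_map]
  rw [← pvRangeMap_eq codes]
  by_cases h : (0 : Int) < codes.length
  · rw [if_pos h]
    have hcnt : ((((codes.length : Int)) - 0 + 2 - 1) / 2).toNat = (((codes.length : Int) + 1) / 2).toNat := by
      omega
    rw [hcnt]
    refine congrArg _ (List.map_congr_left fun k _ => ?_)
    have hb : (0 : Int) + 2 * (k : Int) = ((2 * k : Nat) : Int) := by push_cast; ring
    have hb2 : ((2 * k : Nat) : Int) + 2 = ((2 * k + 2 : Nat) : Int) := by push_cast; ring
    simp only [Function.comp]
    rw [hb, hb2, PySem.List.slice_natCast]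
    congr 2
    omega
  · have h0 : codes.length = 0 := by omega
    rw [if_neg h]
    simp [List.length_eq_zero_iff.mp h0]

-- ===== VERDICT (by name: the statement is the Claim_ definition above) =====
theorem Convert_Text_spec : Claim_equal_Convert_Text := by
  intro s _
  unfold Spec_Convert_Text Convert_Text Convert_Text_alt
  simp only [pvALoop_eq, List.nil_append, pvChunk_eq_joinChunk, List.length_map]
  rw [← pvFoldl_eq (s.toList.map pvEnc)]
  simp
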